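-- pv_equiv track=rewrite | github.com/guicavalheiro/vigenereDecypher | main.py | gera_sequencias_chave
-- ===== SOURCE A (Python) =====
-- def gera_sequencias_chave(texto, tam_chave):
--
--     sequencias = list()
--
--     for chave in range(tam_chave):
--
--         construtor = str()
--         for pulo in range(0, len(texto[chave:]), tam_chave):
--             construtor += texto[chave + pulo]
--
--         sequencias.append(construtor)
--
--     return sequencias
-- ===== SOURCE B (Python) =====
-- def gera_sequencias_chave(texto, tam_chave):
--     if tam_chave <= 0:
--         return []
--     buckets = ["" for _ in range(tam_chave)]
--     for i, c in enumerate(texto):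
--         buckets[i % tam_chave] += c
--     return buckets
-- ===== Notes on version B (the rewrite author's own statement) =====
-- stated objective: faster
-- what changed: Replaces the nested offset/stride loops (with repeated texto[chave:] slicing per offset) by a single linear pass that distributes each character to bucket i % tam_chave.
import Mathlib
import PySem

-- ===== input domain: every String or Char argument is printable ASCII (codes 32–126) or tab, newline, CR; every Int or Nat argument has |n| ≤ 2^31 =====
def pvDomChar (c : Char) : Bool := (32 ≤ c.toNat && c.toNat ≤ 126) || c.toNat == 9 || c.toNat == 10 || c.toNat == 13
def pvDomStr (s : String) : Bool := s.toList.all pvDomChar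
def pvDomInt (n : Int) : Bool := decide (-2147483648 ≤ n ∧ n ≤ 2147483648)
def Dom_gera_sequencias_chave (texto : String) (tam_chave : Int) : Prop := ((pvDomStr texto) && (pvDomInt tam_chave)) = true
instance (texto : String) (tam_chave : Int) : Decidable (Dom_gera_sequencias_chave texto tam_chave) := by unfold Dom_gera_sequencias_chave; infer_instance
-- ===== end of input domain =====

-- B replaces A's nested offset/stride loops by a single pass distributing each character
-- to bucket i % tam_chave (objective: faster by a constant factor — no per-offset re-slicing).

-- ===== PORT A =====
def gera_sequencias_chave (texto : String) (tam_chave : Int) : List String :=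
  (PySem.List.pyRange 0 tam_chave 1).foldl
    (fun sequencias chave =>
      let construtor : String :=
        (PySem.List.pyRange 0 (PySem.Str.len (PySem.Str.slice texto (some chave) none)) tam_chave).foldl
          (fun construtor pulo => construtor ++ String.ofList [(PySem.Str.pyGet? texto (chave + pulo)).getD ' '])
          ""
      sequencias ++ [construtor])
    []

-- ===== PORT B =====
def gera_sequencias_chave_alt (texto : String) (tam_chave : Int) : List String :=
  if tam_chave ≤ 0 then []
  else
    (PySem.List.enumerate texto.toList 0).foldl
      (fun buckets p =>
        buckets.modify (PySem.Int.mod p.1 tam_chave).toNat (fun s => s ++ String.ofList [p.2]))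
      (List.replicate tam_chave.toNat "")

-- ===== PRECONDITION & SPEC =====
def Spec_gera_sequencias_chave (texto : String) (tam_chave : Int) (out : List String) : Prop := out = gera_sequencias_chave_alt texto tam_chave
instance (texto : String) (tam_chave : Int) (out : List String) : Decidable (Spec_gera_sequencias_chave texto tam_chave out) := by unfold Spec_gera_sequencias_chave; infer_instance

-- ===== CLAIM (what is proved, stated in full; the proofs are below) =====
def Claim_equal_gera_sequencias_chave : Prop := ∀ (texto : String) (tam_chave : Int), Dom_gera_sequencias_chave texto tam_chave → Spec_gera_sequencias_chave texto tam_chave (gera_sequencias_chave texto tam_chave)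

-- ===== LEMMAS AND PROOFS =====

-- Python % on a positive modulus is Int.emod
theorem pvModCast (k : Int) (hk : 0 < k) (i : Int) : PySem.Int.mod i k = i % k := by
  simp [PySem.Int.mod, Int.fmod_eq_emod, hk.le]

-- a foldl that appends one char per element builds acc ++ the mapped list (on toList)
theorem pvFoldPush {α : Type} (g : α → Char) (L : List α) (acc : String) :
    (L.foldl (fun c x => c ++ String.ofList [g x]) acc).toList = acc.toList ++ L.map g := by
  induction L generalizing acc with
  | nil => simp
  | cons a t ih => simp [ih, String.toList_append]

-- mapping String.toList through B's distribution loop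
theorem pvMapFold (k : Int) (E : List (Int × Char)) : ∀ (bs : List String),
    List.map String.toList
      (E.foldl (fun b p => b.modify (PySem.Int.mod p.1 k).toNat (fun s => s ++ String.ofList [p.2])) bs)
    = E.foldl (fun b p => b.modify (PySem.Int.mod p.1 k).toNat (fun l => l ++ [p.2]))
        (bs.map String.toList) := by
  induction E with
  | nil => intro bs; simp
  | cons e t ih =>
    intro bs
    simp only [List.foldl_cons, ih]
    congr 1
    apply List.ext_getElem
    · simp
    · intro i h1 h2
      simp [List.getElem_modify]
      split_ifs <;> simp [String.toList_append]

-- B's single-pass distribution, characterised bucket-by-bucket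
theorem pvDistrib (k : Int) (hk : 0 < k)
    (cs : List Char) : ∀ (s : Int) (bs : List (List Char)), bs.length = k.toNat →
    ((PySem.List.enumerate cs s).foldl
        (fun b p => b.modify (PySem.Int.mod p.1 k).toNat (fun l => l ++ [p.2])) bs)
    = (List.range k.toNat).map (fun j =>
        bs.getD j [] ++ ((PySem.List.enumerate cs s).filter
            (fun p => PySem.Int.mod p.1 k = (j : Int))).map (·.2)) := by
  induction cs with
  | nil =>
    intro s bs h
    simp [PySem.List.enumerate_nil]
    apply List.ext_getElem <;> simp_all
  | cons c t ih =>
    intro s bs h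
    have hse : PySem.Int.mod s k = s % k := pvModCast k hk s
    have hm0 : 0 ≤ PySem.Int.mod s k := hse ▸ Int.emod_nonneg s (ne_of_gt hk)
    have hmk : PySem.Int.mod s k < k := hse ▸ Int.emod_lt_of_pos s hk
    rw [PySem.List.enumerate_cons, List.foldl_cons]
    rw [ih (s+1) _ (by simp [h])]
    apply List.map_congr_left
    intro j hj
    have hjk : j < k.toNat := List.mem_range.mp hj
    simp only [List.filter_cons]
    by_cases hc : PySem.Int.mod s k = (j : Int)
    · have hIdx : (PySem.Int.mod s k).toNat = j := by omega
      simp only [hc, decide_true, if_pos]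
      rw [List.getD_eq_getElem _ _ (by simp [List.length_modify]; omega),
          List.getD_eq_getElem _ _ (by omega)]
      simp
    · have hIdx : (PySem.Int.mod s k).toNat ≠ j := by omega
      simp only [hc, decide_false, if_neg, Bool.false_eq_true, not_false_iff]
      rw [List.getD_eq_getElem _ _ (by simp [List.length_modify]; omega),
          List.getD_eq_getElem _ _ (by omega)]
      simp [hIdx]

-- the offsets A visits for key position j are exactly the indices ≡ j (mod k)
theorem pvKeyRange (k : Int) (hk : 0 < k) (n : Nat) (j : Nat) (hj : (j : Int) < k) :
    ((PySem.List.pyRange 0 ((n - j : Nat) : Int) k).map (fun p => (j : Int) + p))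
    = (PySem.List.pyRange 0 (n : Int) 1).filter (fun i => PySem.Int.mod i k = (j : Int)) := by
  have hLp : (PySem.List.pyRange 0 ((n - j : Nat) : Int) k).Pairwise (· < ·) := by
    rw [PySem.List.pyRange_of_pos _ _ hk]
    refine List.Pairwise.map _ ?_ List.pairwise_lt_range
    intro a b hab
    have : (a : Int) < b := by exact_mod_cast hab
    nlinarith
  have hL : (List.map (fun p => (j : Int) + p) (PySem.List.pyRange 0 ((n - j : Nat) : Int) k)).Pairwise (· < ·) :=
    List.Pairwise.map _ (by intro a b hab; omega) hLp
  have hR : ((PySem.List.pyRange 0 (n : Int) 1).filter (fun i => PySem.Int.mod i k = (j : Int))).Pairwise (· < ·) :=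
    List.Pairwise.filter _ (PySem.List.pairwise_lt_pyRange_one 0 n)
  have hmem : ∀ x : Int,
      x ∈ List.map (fun p => (j : Int) + p) (PySem.List.pyRange 0 ((n - j : Nat) : Int) k) ↔
      x ∈ (PySem.List.pyRange 0 (n : Int) 1).filter (fun i => PySem.Int.mod i k = (j : Int)) := by
    intro x
    simp only [List.mem_map, List.mem_filter, PySem.List.mem_pyRange_iff_of_pos hk,
      PySem.List.mem_pyRange_one, pvModCast k hk, decide_eq_true_eq]
    constructor
    · rintro ⟨p, ⟨hp0, hpm, q, hq⟩, rfl⟩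
      have hq0 : 0 ≤ q := by nlinarith
      have hxmod : (↑j + p) % k = ↑j := by
        have : (↑j + p) = ↑j + k * q := by omega
        rw [this, Int.add_mul_emod_self_left]
        exact Int.emod_eq_of_lt (by positivity) hj
      refine ⟨⟨by omega, by omega⟩, hxmod⟩
    · rintro ⟨⟨hx0, hxn⟩, hxm⟩
      have hd : (x - j) % k = 0 := by
        rw [Int.sub_emod, hxm, Int.emod_eq_of_lt (by positivity) hj]
        simp
      obtain ⟨q, hq⟩ := Int.dvd_of_emod_eq_zero hd
      have hq0 : 0 ≤ q := by nlinarith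
      have hjx : (j : Int) ≤ x := by nlinarith
      refine ⟨x - j, ⟨by omega, by omega, ?_⟩, by omega⟩
      rw [sub_zero]
      exact Int.dvd_of_emod_eq_zero hd
  exact ((List.perm_ext_iff_of_nodup hL.nodup hR.nodup).mpr hmem).eq_of_sorted
    (fun a b _ _ h1 h2 => le_antisymm h1 h2) (hL.imp le_of_lt) (hR.imp le_of_lt)

-- ===== VERDICT (by name: the statement is the Claim_ definition above) =====
theorem gera_sequencias_chave_spec : Claim_equal_gera_sequencias_chave := by
  intro texto tam_chave _
  unfold Spec_gera_sequencias_chave gera_sequencias_chave gera_sequencias_chave_alt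
  by_cases hk : tam_chave ≤ 0
  · rw [if_pos hk, PySem.List.pyRange_one_eq_nil hk]
    simp
  · rw [if_neg hk]
    have hk' : 0 < tam_chave := by omega
    set k := tam_chave
    set cs := texto.toList with hcs
    set n := cs.length with hn
    -- collapse A's outer loop into a map
    simp only [PySem.List.foldl_append_singleton_eq_map, List.nil_append]
    rw [PySem.List.pyRange_one]
    -- compare after mapping String.toList over both sides
    apply List.map_injective_iff.mpr (fun a b h => String.toList_inj.mp h)
    rw [pvMapFold, List.map_map, List.map_replicate]
    rw [pvDistrib k hk' cs 0 _ (by simp)]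
    rw [List.map_map]
    simp only [sub_zero]
    apply List.map_congr_left
    intro j hj
    have hjK : j < k.toNat := List.mem_range.mp hj
    have hjk : (j : Int) < k := by omega
    -- A's bucket j, on toList
    simp only [Function.comp_apply, zero_add, pvFoldPush, String.toList_empty, List.nil_append]
    -- the slice length is n - j
    have hlen : PySem.Str.len (PySem.Str.slice texto (some (j : Int)) none) = ((n - j : Nat) : Int) := by
      simp [PySem.Str.len_eq, PySem.Str.slice, PySem.Chars.slice,
        PySem.List.slice_from _ (by positivity : (0:Int) ≤ (j : Int)), ← hcs, hn]
    rw [hlen]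
    -- rewrite A's stride as the mod-filter of all indices
    have hA : (PySem.List.pyRange 0 ((n - j : Nat) : Int) k).map
          (fun p => (PySem.Str.pyGet? texto ((j : Int) + p)).getD ' ')
        = ((PySem.List.pyRange 0 ((n - j : Nat) : Int) k).map (fun p => (j : Int) + p)).map
          (fun i => PySem.List.pyGetD cs i ' ') := by
      rw [List.map_map]
      apply List.map_congr_left
      intro p _
      simp [PySem.Str.pyGet?, PySem.Chars.pyGet?, PySem.List.pyGetD, hcs]
    rw [hA, pvKeyRange k hk' n j hjk]
    -- B's bucket j is the same mod-filter
    rw [PySem.List.enumerate_eq_map_pyRange cs ' ', List.filter_map, List.map_map]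
    simp [PySem.List.len, Function.comp_def]
    rfl
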